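-- pv_equiv track=rewrite | github.com/AA-Turner/top-pypi-sdists-full | extracted/ch/chalkpy/chalk/features/resolver.py | simplify_function_definition
-- ===== SOURCE A (Python) =====
-- from typing import (
--     TYPE_CHECKING,
--     Any,
--     AsyncGenerator,
--     AsyncIterable,
--     AsyncIterator,
--     Callable,
--     Collection,
--     Dict,
--     Generator,
--     Generic,
--     Iterable,
--     Iterator,
--     List,
--     Literal,
--     Mapping,
--     Optional,
--     Protocol,
--     Sequence,
--     Type,
--     TypeVar,
--     Union,
--     cast,
--     overload,
-- )
--
-- def simplify_function_definition(text: str) -> str: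
--     lines = text.split("\n")
--     if lines[0].startswith("@"):
--         lines = lines[1:]
--     open_parentheses_count = 0
--     started = False
--     definition_lines: List[str] = []
--     for line in lines:
--         if "(" in line:
--             open_parentheses_count += line.count("(")
--             started = True
--         if ")" in line:
--             open_parentheses_count -= line.count(")")
--             started = True
--         definition_lines.append(line)
--         if started is True and open_parentheses_count == 0:
--             return "\n".join(definition_lines)
--     return "\n".join(definition_lines)
-- ===== SOURCE B (Python) =====
-- def simplify_function_definition(text: str) -> str:
--     # Single character-level scan; no line splitting or per-line counting.
--     if text.startswith("@"):
--         nl = text.find("\n")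
--         rest = text[nl + 1:] if nl != -1 else ""
--     else:
--         rest = text
--     balance = 0
--     seen = False
--     for i, ch in enumerate(rest):
--         if ch == "(":
--             balance += 1
--             seen = True
--         elif ch == ")":
--             balance -= 1
--             seen = True
--         elif ch == "\n":
--             if seen and balance == 0:
--                 return rest[:i]
--     return rest
-- ===== Notes on version B (the rewrite author's own statement) =====
-- stated objective: alternative
-- what changed: B replaces A's split-into-lines loop with per-line substring counts of opening and closing parentheses and a joined accumulator of lines by a single character-level state machine over the raw string that returns a prefix slice at the first newline where a parenthesis has been seen and the running balance is zero.
import Mathlib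
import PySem

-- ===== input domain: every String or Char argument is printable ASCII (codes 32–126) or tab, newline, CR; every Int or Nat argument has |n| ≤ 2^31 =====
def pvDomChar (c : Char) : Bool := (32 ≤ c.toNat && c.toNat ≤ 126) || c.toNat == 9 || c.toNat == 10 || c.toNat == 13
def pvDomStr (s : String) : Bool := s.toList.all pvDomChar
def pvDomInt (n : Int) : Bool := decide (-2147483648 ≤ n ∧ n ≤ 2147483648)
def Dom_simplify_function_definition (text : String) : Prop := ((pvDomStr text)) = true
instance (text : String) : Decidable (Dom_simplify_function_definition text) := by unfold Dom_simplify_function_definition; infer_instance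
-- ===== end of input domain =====

-- B replaces A's line-splitting loop with per-line paren counts by a single character-level
-- state machine over the raw string (objective: alternative, same O(n) cost).

-- ===== PORT A =====
-- the 'for line in lines' loop with its early return; state (open_parentheses_count, started, definition_lines)
def pvALoop (ls : List (List Char)) (cnt : Int) (started : Bool) (acc : List (List Char)) : List (List Char) :=
  match ls with
  | [] => acc
  | line :: rest =>
    let cnt1 := if PySem.Chars.isIn ['('] line then cnt + (PySem.Chars.count line ['('] : Int) else cnt
    let st1 := if PySem.Chars.isIn ['('] line then true else started
    let cnt2 := if PySem.Chars.isIn [')'] line then cnt1 - (PySem.Chars.count line [')'] : Int) else cnt1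
    let st2 := if PySem.Chars.isIn [')'] line then true else st1
    let acc1 := acc ++ [line]
    if st2 && cnt2 == 0 then acc1 else pvALoop rest cnt2 st2 acc1

def simplify_function_definition (text : String) : String :=
  let lines := PySem.Chars.splitOn text.toList ['\n']
  -- lines[0]: splitting on a non-empty separator never yields [], so Python's lines[0] never raises (headD's default is dead)
  let lines2 := if PySem.Chars.startswith (lines.headD []) ['@'] then lines.drop 1 else lines
  String.ofList (PySem.Chars.join ['\n'] (pvALoop lines2 0 false []))

-- ===== PORT B =====
-- 'for i, ch in enumerate(rest)': returns the index of the newline at which B's early return fires, else none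
def pvBFind (cs : List Char) (bal : Int) (seen : Bool) (i : Nat) : Option Nat :=
  match cs with
  | [] => none
  | c :: t =>
    if c = '(' then pvBFind t (bal + 1) true (i + 1)
    else if c = ')' then pvBFind t (bal - 1) true (i + 1)
    else if c = '\n' then (if seen && bal == 0 then some i else pvBFind t bal seen (i + 1))
    else pvBFind t bal seen (i + 1)

def simplify_function_definition_alt (text : String) : String :=
  let cs := text.toList
  let rest := if PySem.Chars.startswith cs ['@'] then
      (let nl := PySem.Chars.find cs ['\n']
       if nl != -1 then PySem.Chars.slice cs (some (nl + 1)) none else [])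
    else cs
  match pvBFind rest 0 false 0 with
  | some i => String.ofList (PySem.Chars.slice rest none (some (i : Int)))
  | none => String.ofList rest

-- ===== PRECONDITION & SPEC =====
def Spec_simplify_function_definition (text : String) (out : String) : Prop := out = simplify_function_definition_alt text
instance (text : String) (out : String) : Decidable (Spec_simplify_function_definition text out) := by unfold Spec_simplify_function_definition; infer_instance

-- ===== CLAIM (what is proved, stated in full; the proofs are below) =====
def Claim_equal_simplify_function_definition : Prop := ∀ (text : String), Dom_simplify_function_definition text → Spec_simplify_function_definition text (simplify_function_definition text)

-- ===== LEMMAS AND PROOFS =====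

-- clean recursive model of text.split("\n") (proof-side only)
def pvSplitc : List Char → List (List Char)
  | [] => [[]]
  | x :: t =>
    if x = '\n' then [] :: pvSplitc t
    else match pvSplitc t with
         | [] => [[x]]
         | h :: r => (x :: h) :: r

-- B's scan followed by the slice / fall-through, as a function of the scanned chars (proof-side only)
def pvBRes (cs : List Char) (bal : Int) (seen : Bool) : List Char :=
  match pvBFind cs bal seen 0 with
  | some i => cs.take i
  | none => cs


theorem pvSplitc_ne_nil (cs : List Char) : pvSplitc cs ≠ [] := by
  cases cs with
  | nil => simp [pvSplitc]
  | cons x t =>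
    simp only [pvSplitc]
    split
    · simp
    · split <;> simp

theorem pvSplitc_no_nl (cs : List Char) : ∀ l ∈ pvSplitc cs, '\n' ∉ l := by
  induction cs with
  | nil => simp [pvSplitc]
  | cons x t ih =>
    simp only [pvSplitc]
    split
    · simpa using ih
    · rename_i hx
      cases h : pvSplitc t with
      | nil => exact absurd h (pvSplitc_ne_nil t)
      | cons hd r =>
        intro l hl
        rw [h] at ih
        rcases List.mem_cons.mp hl with rfl | hmem
        · have h2 := ih hd (by simp)
          simp only [List.mem_cons, not_or] at h2 ⊢
          exact ⟨fun he => hx he.symm, h2⟩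
        · exact ih l (by simp [hmem])

theorem pvSplitc_inter (cs : List Char) : List.intercalate ['\n'] (pvSplitc cs) = cs := by
  induction cs with
  | nil => simp [pvSplitc, List.intercalate]
  | cons x t ih =>
    simp only [pvSplitc]
    split
    · rename_i hx
      subst hx
      cases h : pvSplitc t with
      | nil => exact absurd h (pvSplitc_ne_nil t)
      | cons hd r =>
        rw [h] at ih
        simp [List.intercalate, List.intersperse] at ih ⊢
        cases r <;> simp_all [List.intercalate, List.intersperse]
    · cases h : pvSplitc t with
      | nil => exact absurd h (pvSplitc_ne_nil t)
      | cons hd r =>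
        rw [h] at ih
        cases r <;> simp_all [List.intercalate, List.intersperse]

theorem pvSplitc_append {a : List Char} (b : List Char) (ha : '\n' ∉ a) :
    pvSplitc (a ++ b) = (pvSplitc b).modifyHead (a ++ ·) := by
  induction a with
  | nil => cases h : pvSplitc b <;> simp [h]
  | cons x t ih =>
    have hx : ¬ x = '\n' := fun he => ha (by simp [he])
    have ht : '\n' ∉ t := fun hm => ha (by simp [hm])
    simp only [List.cons_append, pvSplitc, hx, if_false, ih ht]
    cases h : pvSplitc b with
    | nil => exact absurd h (pvSplitc_ne_nil b)
    | cons hd r => simp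

theorem pvSplitOn_go_eq (fuel : Nat) (l cur : List Char) (acc : List (List Char))
    (h : l.length < fuel) :
    PySem.Chars.splitOn.go ['\n'] fuel l cur acc
      = acc.reverse ++ (pvSplitc l).modifyHead (cur.reverse ++ ·) := by
  induction fuel generalizing l cur acc with
  | zero => omega
  | succ n ih =>
    cases l with
    | nil => simp [PySem.Chars.splitOn.go, pvSplitc]
    | cons c rest =>
      simp only [PySem.Chars.splitOn.go]
      by_cases hc : c = '\n'
      · subst hc
        rw [if_pos (by simp [List.isPrefixOf])]
        simp only [List.length_cons, List.length_nil, List.drop_succ_cons, List.drop_zero]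
        rw [ih rest [] (cur.reverse :: acc) (by simpa using Nat.lt_of_succ_lt_succ h)]
        simp [pvSplitc]
        cases pvSplitc rest <;> simp
      · rw [if_neg (by simp [List.isPrefixOf]; exact fun he => hc he.symm)]
        rw [ih rest (c :: cur) acc (by simpa using Nat.lt_of_succ_lt_succ h)]
        simp only [pvSplitc, hc, if_false]
        cases hs : pvSplitc rest with
        | nil => exact absurd hs (pvSplitc_ne_nil rest)
        | cons hd r => simp

theorem pvSplitOn_eq (cs : List Char) : PySem.Chars.splitOn cs ['\n'] = pvSplitc cs := by
  rw [PySem.Chars.splitOn, pvSplitOn_go_eq (cs.length + 1) cs [] [] (by omega)]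
  cases h : pvSplitc cs with
  | nil => exact absurd h (pvSplitc_ne_nil cs)
  | cons hd r => simp

theorem pvCount_go_single (c : Char) (fuel : Nat) (l : List Char) (acc : Nat)
    (h : l.length ≤ fuel) : PySem.Chars.count.go [c] fuel l acc = acc + l.count c := by
  induction fuel generalizing l acc with
  | zero =>
    cases l with
    | nil => simp [PySem.Chars.count.go]
    | cons x t => simp at h
  | succ n ih =>
    cases l with
    | nil => simp [PySem.Chars.count.go]
    | cons x t =>
      simp only [PySem.Chars.count.go]
      by_cases hx : x = c
      · subst hx
        rw [if_pos (by simp [List.isPrefixOf])]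
        simp only [List.length_cons, List.length_nil, List.drop_succ_cons, List.drop_zero]
        rw [ih t (acc + 1) (by simpa using Nat.le_of_succ_le_succ h)]
        simp [List.count_cons]
        omega
      · rw [if_neg (by simp [List.isPrefixOf]; exact fun he => hx he.symm)]
        rw [ih t acc (by simpa using Nat.le_of_succ_le_succ h)]
        simp [List.count_cons, hx]

theorem pvCount_single (l : List Char) (c : Char) : PySem.Chars.count l [c] = l.count c := by
  rw [PySem.Chars.count]
  simp only [List.isEmpty_cons, if_false, Bool.false_eq_true]
  simpa using pvCount_go_single c l.length l 0 (le_refl _)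

theorem pvIsIn_single (l : List Char) (c : Char) : PySem.Chars.isIn [c] l = true ↔ c ∈ l := by
  rw [PySem.Chars.isIn_iff_infix]
  exact List.singleton_infix_iff c l




theorem pvALoop_acc (ls : List (List Char)) (cnt : Int) (st : Bool) (acc : List (List Char)) :
    pvALoop ls cnt st acc = acc ++ pvALoop ls cnt st [] := by
  induction ls generalizing cnt st acc with
  | nil => simp [pvALoop]
  | cons l rest ih =>
    simp only [pvALoop]
    split <;> split <;>
      (simp [ih _ _ (acc ++ [l]), ih _ _ ([l] : List (List Char)), ih _ _ ([] ++ [l])]) <;>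
      (try (split <;> rfl))

theorem pvALoop_ne_nil (l : List Char) (ls : List (List Char)) (cnt : Int) (st : Bool) :
    pvALoop (l :: ls) cnt st [] ≠ [] := by
  simp only [pvALoop]
  split <;> split <;> split <;>
    simp [pvALoop_acc _ _ _ ([l] : List (List Char)), pvALoop_acc _ _ _ ([] ++ [l])]

theorem pvBFind_shift (cs : List Char) (bal : Int) (seen : Bool) (i : Nat) :
    pvBFind cs bal seen i = Option.map (· + i) (pvBFind cs bal seen 0) := by
  induction cs generalizing bal seen i with
  | nil => simp [pvBFind]
  | cons c t ih =>
    simp only [pvBFind]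
    split
    · rw [ih _ _ (i + 1), ih _ _ (0 + 1)]
      cases pvBFind t (bal + 1) true 0 <;> simp <;> omega
    · split
      · rw [ih _ _ (i + 1), ih _ _ (0 + 1)]
        cases pvBFind t (bal - 1) true 0 <;> simp <;> omega
      · split
        · split
          · simp
          · rw [ih _ _ (i + 1), ih _ _ 1]
            cases pvBFind t bal seen 0 <;> simp <;> omega
        · rw [ih _ _ (i + 1), ih _ _ 1]
          cases pvBFind t bal seen 0 <;> simp <;> omega

theorem pvBFind_line (l s : List Char) (hl : '\n' ∉ l) (bal : Int) (seen : Bool) (i : Nat) :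
    pvBFind (l ++ s) bal seen i
      = pvBFind s (bal + (l.count '(' : Int) - (l.count ')' : Int))
          (seen || (l.contains '(' || l.contains ')')) (i + l.length) := by
  induction l generalizing bal seen i with
  | nil => simp [pvBFind]
  | cons x t ih =>
    have hx : ¬ x = '\n' := fun he => hl (by simp [he])
    have ht : '\n' ∉ t := fun hm => hl (by simp [hm])
    simp only [List.cons_append, pvBFind]
    by_cases h1 : x = '('
    · subst h1
      rw [if_pos rfl, ih ht]
      congr 1
      · simp [List.count_cons]; push_cast; ring
      · simp
      · simp; omega
    · rw [if_neg h1]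
      by_cases h2 : x = ')'
      · subst h2
        rw [if_pos rfl, ih ht]
        congr 1
        · simp [List.count_cons, h1]; push_cast; ring
        · simp
        · simp; omega
      · rw [if_neg h2, if_neg hx, ih ht]
        have h1' : ¬ '(' = x := fun he => h1 he.symm
        have h2' : ¬ ')' = x := fun he => h2 he.symm
        congr 1
        · simp [List.count_cons, h1, h2]
        · simp [h1', h2']
        · simp; omega

theorem pvIsIn_single_eq (l : List Char) (c : Char) : PySem.Chars.isIn [c] l = l.contains c := by
  by_cases h : c ∈ l
  · have := (pvIsIn_single l c).mpr h
    simp [this, h]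
  · have hf : PySem.Chars.isIn [c] l = false := by
      cases hb : PySem.Chars.isIn [c] l
      · rfl
      · exact absurd ((pvIsIn_single l c).mp hb) h
    simp [hf, h]

theorem pvInter_cons (a : List Char) (r : List (List Char)) (hr : r ≠ []) :
    List.intercalate ['\n'] (a :: r) = a ++ '\n' :: List.intercalate ['\n'] r := by
  cases r with
  | nil => exact absurd rfl hr
  | cons h t => simp [List.intercalate, List.intersperse]

theorem pvInter_singleton (a : List Char) : List.intercalate ['\n'] [a] = a := by
  simp [List.intercalate]

theorem pvALoop_cons (l : List Char) (t : List (List Char)) (cnt : Int) (st : Bool) (acc : List (List Char)) :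
    pvALoop (l :: t) cnt st acc =
      if (st || (l.contains '(' || l.contains ')'))
          && (cnt + (l.count '(' : Int) - (l.count ')' : Int) == 0)
      then acc ++ [l]
      else pvALoop t (cnt + (l.count '(' : Int) - (l.count ')' : Int))
             (st || (l.contains '(' || l.contains ')')) (acc ++ [l]) := by
  simp only [pvALoop, pvIsIn_single_eq, pvCount_single]
  by_cases hp : '(' ∈ l <;> by_cases hq : ')' ∈ l
  · simp [hp, hq]
  · have h0 : l.count ')' = 0 := List.count_eq_zero.mpr hq
    simp [hp, hq, h0]
  · have h0 : l.count '(' = 0 := List.count_eq_zero.mpr hp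
    simp [hp, hq, h0]
  · have h0 : l.count '(' = 0 := List.count_eq_zero.mpr hp
    have h0' : l.count ')' = 0 := List.count_eq_zero.mpr hq
    simp [hp, hq, h0, h0']

theorem pvCore (ls : List (List Char)) (hne : ls ≠ []) (hnl : ∀ l ∈ ls, '\n' ∉ l)
    (bal : Int) (seen : Bool) :
    pvBRes (List.intercalate ['\n'] ls) bal seen
      = List.intercalate ['\n'] (pvALoop ls bal seen []) := by
  induction ls generalizing bal seen with
  | nil => exact absurd rfl hne
  | cons l t ih =>
    have hl : '\n' ∉ l := hnl l (by simp)
    cases t with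
    | nil =>
      rw [pvInter_singleton, pvALoop_cons]
      unfold pvBRes
      rw [show (l : List Char) = l ++ [] from (List.append_nil l).symm,
        pvBFind_line l [] hl bal seen 0]
      simp only [pvBFind]
      split <;> simp [pvALoop, pvInter_singleton]
    | cons m t' =>
      have hKne : (m :: t') ≠ ([] : List (List Char)) := by simp
      rw [pvInter_cons l (m :: t') hKne, pvALoop_cons]
      unfold pvBRes
      rw [pvBFind_line l ('\n' :: List.intercalate ['\n'] (m :: t')) hl bal seen 0]
      have hstep : pvBFind ('\n' :: List.intercalate ['\n'] (m :: t'))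
          (bal + (l.count '(' : Int) - (l.count ')' : Int))
          (seen || (l.contains '(' || l.contains ')')) (0 + l.length)
        = if (seen || (l.contains '(' || l.contains ')'))
              && ((bal + (l.count '(' : Int) - (l.count ')' : Int)) == 0)
          then some (0 + l.length)
          else pvBFind (List.intercalate ['\n'] (m :: t'))
                 (bal + (l.count '(' : Int) - (l.count ')' : Int))
                 (seen || (l.contains '(' || l.contains ')')) (0 + l.length + 1) := by
        simp [pvBFind]
      rw [hstep]
      by_cases hcond : ((seen || (l.contains '(' || l.contains ')'))
          && ((bal + (l.count '(' : Int) - (l.count ')' : Int)) == 0)) = true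
      · rw [if_pos hcond, if_pos hcond]
        simp [List.take_left', pvInter_singleton]
      · rw [if_neg hcond, if_neg hcond]
        rw [pvALoop_acc]
        simp only [List.nil_append, List.singleton_append]
        rw [pvInter_cons l _ (pvALoop_ne_nil m t' _ _)]
        have hIH := ih (by simp) (fun x hx => hnl x (by simp [hx]))
          (bal + (l.count '(' : Int) - (l.count ')' : Int))
          (seen || (l.contains '(' || l.contains ')'))
        unfold pvBRes at hIH
        rw [pvBFind_shift _ _ _ (0 + l.length + 1)]
        cases hB : pvBFind (List.intercalate ['\n'] (m :: t'))
            (bal + (l.count '(' : Int) - (l.count ')' : Int))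
            (seen || (l.contains '(' || l.contains ')')) 0 with
        | none =>
          rw [hB] at hIH
          simp only at hIH
          simp only [hB, Option.map_none]
          simp [hIH]
        | some j =>
          rw [hB] at hIH
          simp only at hIH
          simp only [hB, Option.map_some]
          have : j + (0 + l.length + 1) = l.length + (1 + j) := by omega
          simp only [this]
          rw [List.take_length_add_append]
          rw [show 1 + j = j + 1 from by omega, List.take_succ_cons]
          simp [hIH]

theorem pvSplitc_of_no_nl (cs : List Char) (h : '\n' ∉ cs) : pvSplitc cs = [cs] := by
  have := pvSplitc_append ([] : List Char) h
  simpa [pvSplitc] using this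

theorem pvHead_startswith (cs : List Char) :
    PySem.Chars.startswith ((pvSplitc cs).headD []) ['@'] = PySem.Chars.startswith cs ['@'] := by
  cases cs with
  | nil => rfl
  | cons x t =>
    simp only [pvSplitc]
    by_cases hx : x = '\n'
    · subst hx
      simp [PySem.Chars.startswith, List.isPrefixOf]
    · rw [if_neg hx]
      cases hs : pvSplitc t with
      | nil => exact absurd hs (pvSplitc_ne_nil t)
      | cons hd r => simp [PySem.Chars.startswith, List.isPrefixOf]

theorem pvBRes_match (cs : List Char) :
    (match pvBFind cs 0 false 0 with
     | some i => String.ofList (PySem.Chars.slice cs none (some (i : Int)))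
     | none => String.ofList cs) = String.ofList (pvBRes cs 0 false) := by
  unfold pvBRes
  cases pvBFind cs 0 false 0 <;> simp [PySem.List.slice_to_natCast]

theorem pvMain (text : String) :
    simplify_function_definition text = simplify_function_definition_alt text := by
  unfold simplify_function_definition simplify_function_definition_alt
  simp only [pvSplitOn_eq, pvHead_startswith]
  by_cases hAt : PySem.Chars.startswith text.toList ['@'] = true
  · by_cases hmem : '\n' ∈ text.toList
    · -- decorator stripped; text has a first newline at index k
      have hinf : ['\n'] <:+: text.toList := (List.singleton_infix_iff _ _).mpr hmem
      have hpos : 0 ≤ PySem.Chars.find text.toList ['\n'] :=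
        (PySem.Chars.find_nonneg_iff _ _).mpr hinf
      obtain ⟨hpre, hmin⟩ := PySem.Chars.find_spec hpos
      set k := (PySem.Chars.find text.toList ['\n']).toNat with hkdef
      obtain ⟨b, hb⟩ : ∃ b, (text.toList.drop k) = '\n' :: b := by
        obtain ⟨u, hu⟩ := hpre
        exact ⟨u, by simpa using hu.symm⟩
      have hk_le : k ≤ text.toList.length := by
        have := PySem.Chars.find_le_length text.toList ['\n']
        omega
      have hcs : text.toList = text.toList.take k ++ '\n' :: b := by
        conv_lhs => rw [← List.take_append_drop k text.toList]
        rw [hb]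
      have hnotin : '\n' ∉ text.toList.take k := by
        intro hm
        obtain ⟨i, hi, hgi⟩ := List.mem_take_iff_getElem.mp hm
        have hik : i < k := (Nat.lt_min.mp hi).1
        have hil : i < text.toList.length := (Nat.lt_min.mp hi).2
        apply hmin i hik
        refine ⟨text.toList.drop (i + 1), ?_⟩
        conv_rhs => rw [List.drop_eq_getElem_cons hil]
        simp [hgi]
      have hsplitc : pvSplitc text.toList = (text.toList.take k) :: pvSplitc b := by
        conv_lhs => rw [hcs]
        rw [pvSplitc_append ('\n' :: b) hnotin]
        simp [pvSplitc]
      have hne : PySem.Chars.find text.toList ['\n'] ≠ -1 := by omega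
      have hdrop : PySem.List.slice text.toList (some (PySem.Chars.find text.toList ['\n'] + 1)) none = b := by
        rw [PySem.List.slice_from _ (by omega)]
        have h1 : (PySem.Chars.find text.toList ['\n'] + 1).toNat = k + 1 := by omega
        rw [h1]
        conv_lhs => rw [hcs]
        rw [show text.toList.take k ++ '\n' :: b = (text.toList.take k ++ ['\n']) ++ b by simp]
        apply List.drop_left'
        simp at hk_le ⊢
        omega
      have hdropC : PySem.Chars.slice text.toList (some (PySem.Chars.find text.toList ['\n'] + 1)) none = b := by
        rw [PySem.Chars.slice_eq_listSlice]
        exact hdrop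
      have hbne : (PySem.Chars.find text.toList ['\n'] != -1) = true := by
        simp [bne_iff_ne, hne]
      simp only [hAt, if_true, hsplitc, List.drop_succ_cons, List.drop_zero, hbne, hdropC]
      rw [pvBRes_match]
      have hcore := pvCore (pvSplitc b) (pvSplitc_ne_nil _) (pvSplitc_no_nl _) 0 false
      rw [pvSplitc_inter] at hcore
      rw [hcore]
      rfl
    · have hfind : PySem.Chars.find text.toList ['\n'] = -1 :=
        (PySem.Chars.find_eq_neg_one_iff _ _).mpr
          (fun hinf => hmem ((List.singleton_infix_iff _ _).mp hinf))
      rw [pvSplitc_of_no_nl _ hmem]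
      simp [hAt, hfind, pvALoop, PySem.Chars.join, pvBFind, List.intercalate]
  · rw [Bool.not_eq_true] at hAt
    simp only [hAt, Bool.false_eq_true, if_false]
    rw [pvBRes_match]
    have hcore := pvCore (pvSplitc text.toList) (pvSplitc_ne_nil _) (pvSplitc_no_nl _) 0 false
    rw [pvSplitc_inter] at hcore
    rw [hcore]
    rfl

-- ===== VERDICT (by name: the statement is the Claim_ definition above) =====
theorem simplify_function_definition_spec : Claim_equal_simplify_function_definition := by
  intro text _
  unfold Spec_simplify_function_definition
  exact pvMain text
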